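-- pv_equiv track=rewrite | github.com/codingbbq/python-katas | duplicate-encoder.py | duplicate_encode_long
-- ===== SOURCE A (Python) =====
-- def duplicate_encode_long(word):
--     d = dict()
--     ret = ""
--     for x in word.lower():
--         if(x in d):
--             d[x] = ")"
--         else:
--             d[x] = "("
--
--     for x in word.lower():
--         ret += d[x]
--
--     return ret
-- ===== SOURCE B (Python) =====
-- def duplicate_encode_long(word):
--     s = word.lower()
--     t = sorted(s)
--     dups = {a for a, b in zip(t, t[1:]) if a == b}
--     return "".join(")" if c in dups else "(" for c in s)
-- ===== Notes on version B (the rewrite author's own statement) =====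
-- stated objective: alternative
-- what changed: Replaces A's hash-table frequency pass with a sort-based algorithm: sort the lowered string, collect into a set every character that equals its successor in the sorted order (adjacent-pair scan over zipped neighbours), then map each character to a close paren iff it is in that duplicate set.
import Mathlib
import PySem

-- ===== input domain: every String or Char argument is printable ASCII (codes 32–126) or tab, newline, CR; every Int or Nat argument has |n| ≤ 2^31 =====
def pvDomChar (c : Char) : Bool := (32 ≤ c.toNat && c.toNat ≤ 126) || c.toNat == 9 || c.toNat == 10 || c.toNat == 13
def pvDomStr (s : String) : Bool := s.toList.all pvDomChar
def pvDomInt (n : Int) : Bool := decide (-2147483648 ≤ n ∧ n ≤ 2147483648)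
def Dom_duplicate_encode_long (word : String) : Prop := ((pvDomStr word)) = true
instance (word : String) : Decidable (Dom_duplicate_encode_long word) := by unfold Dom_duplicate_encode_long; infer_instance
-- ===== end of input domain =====

-- B replaces A's dict-frequency pass with a sort-based algorithm (sort, adjacent-pair scan for
-- duplicates, then map); equivalence proved on all inputs.


-- ===== PORT A =====
-- literal port of A; strings modelled as lists of chars (dict values "(" / ")" become ['('] / [')']);
-- d[x] in the second loop is ported as getD with default [] — exact because every x of w was inserted in the first loop
def duplicate_encode_long (word : String) : String :=
  let w := (PySem.Str.lower word).toList
  let d : PySem.Dict Char (List Char) :=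
    w.foldl (fun d x => if d.contains x then d.insert x [')'] else d.insert x ['(']) PySem.Dict.empty
  let ret := w.foldl (fun ret x => ret ++ d.getD x []) ([] : List Char)
  String.mk ret

-- ===== PORT B =====
-- literal port of Source B: t = sorted(s); dups = {a for a, b in zip(t, t[1:]) if a == b};
-- "".join(")" if c in dups else "(" for c in s)
def duplicate_encode_long_alt (word : String) : String :=
  let s := (PySem.Str.lower word).toList
  let t := PySem.List.sorted s (fun x => x) false
  let dups : PySem.Set Char :=
    PySem.Set.ofList ((t.zip (PySem.List.slice t (some 1) none)).filterMap
      (fun p => if p.1 = p.2 then some p.1 else none))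
  String.mk (s.map (fun c => if PySem.Set.contains dups c then ')' else '('))

-- ===== PRECONDITION & SPEC =====
def Spec_duplicate_encode_long (word : String) (out : String) : Prop := out = duplicate_encode_long_alt word
instance (word : String) (out : String) : Decidable (Spec_duplicate_encode_long word out) := by unfold Spec_duplicate_encode_long; infer_instance

-- ===== CLAIM (what is proved, stated in full; the proofs are below) =====
def Claim_equal_duplicate_encode_long : Prop := ∀ (word : String), Dom_duplicate_encode_long word → Spec_duplicate_encode_long word (duplicate_encode_long word)

-- ===== LEMMAS AND PROOFS =====

-- A's finished dict: membership
theorem pvDictA_contains (l : List Char) : ∀ (c : Char),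
    ((l.foldl (fun d x => if d.contains x then d.insert x [')'] else d.insert x ['(']) PySem.Dict.empty).contains c
      = decide (c ∈ l)) := by
  induction l using List.reverseRecOn with
  | nil => simp [PySem.Dict.contains_empty]
  | append_singleton t x ih =>
    intro c
    rw [List.foldl_append]
    simp only [List.foldl_cons, List.foldl_nil]
    split_ifs <;> by_cases hcx : c = x <;>
      simp [PySem.Dict.contains_insert, ih, hcx]

-- A's finished dict, characterised by occurrence counts
theorem pvDictA_getD (l : List Char) : ∀ (c : Char),
    ((l.foldl (fun d x => if d.contains x then d.insert x [')'] else d.insert x ['(']) PySem.Dict.empty).getD c [] =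
      if l.count c = 0 then [] else if l.count c = 1 then ['('] else [')']) := by
  induction l using List.reverseRecOn with
  | nil => simp [PySem.Dict.getD_empty]
  | append_singleton t x ih =>
    intro c
    rw [List.foldl_append]
    simp only [List.foldl_cons, List.foldl_nil]
    by_cases hcx : c = x
    · subst hcx
      by_cases hm : c ∈ t
      · have h1 : 1 ≤ t.count c := List.one_le_count_iff.mpr hm
        simp [pvDictA_contains t, hm, PySem.Dict.getD_insert_self, List.count_append]
        omega
      · have h0 : t.count c = 0 := List.count_eq_zero.mpr hm
        simp [pvDictA_contains t, hm, PySem.Dict.getD_insert_self, List.count_append, h0]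
    · have hcnt : (t ++ [x]).count c = t.count c := by
        simp [List.count_append, Ne.symm hcx]
      rw [hcnt, ← ih c]
      split_ifs <;> simp [PySem.Dict.getD_insert, hcx]

-- B's adjacent-pair scan over a sorted list finds exactly the characters of count ≥ 2
theorem pvAdjDups_mem (t : List Char) (hs : t.Pairwise (· ≤ ·)) (c : Char) :
    (c ∈ (t.zip t.tail).filterMap (fun p => if p.1 = p.2 then some p.1 else none)) ↔
      2 ≤ t.count c := by
  induction t with
  | nil => simp
  | cons x r ih =>
    cases r with
    | nil =>
      simp only [List.tail_cons, List.zip_nil_right, List.filterMap_nil, List.not_mem_nil,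
        false_iff, not_le]
      calc List.count c [x] ≤ [x].length := List.count_le_length
        _ < 2 := by simp
    | cons y r' =>
      have hxy : x ≤ y := (List.pairwise_cons.mp hs).1 y (by simp)
      have hyall : ∀ z ∈ r', y ≤ z := (List.pairwise_cons.mp ((List.pairwise_cons.mp hs).2)).1
      have ih' := ih (List.pairwise_cons.mp hs).2
      simp only [List.tail_cons, List.zip_cons_cons, List.filterMap_cons] at ih' ⊢
      by_cases hxy' : x = y
      · by_cases hcx : c = x
        · have hcy : c = y := hcx.trans hxy'
          have h2 : 2 ≤ List.count c (x :: y :: r') := by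
            simp only [List.count_cons, hcx.symm, hcy.symm, beq_self_eq_true, if_true]
            omega
          simp only [if_pos hxy', List.mem_cons]
          exact iff_of_true (Or.inl hcx) h2
        · simp only [if_pos hxy', List.mem_cons]
          rw [show (List.count c (x :: y :: r') = List.count c (y :: r')) from by
            simp [List.count_cons, Ne.symm hcx]]
          rw [← ih']
          simp [hcx]
      · have hnx : x ∉ y :: r' := by
          intro hmem
          rcases List.mem_cons.mp hmem with h | h
          · exact hxy' h
          · exact hxy' (le_antisymm hxy (hyall x h))
        simp only [if_neg hxy']
        rw [ih']
        by_cases hcx : c = x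
        · subst hcx
          have h0 : List.count c (y :: r') = 0 := List.count_eq_zero.mpr hnx
          simp [h0]
        · rw [show (List.count c (x :: y :: r') = List.count c (y :: r')) from by
            simp [List.count_cons, Ne.symm hcx]]

-- A's accumulation loop produces exactly the per-character map of its dict values
theorem pvA_ret_eq_map (w : List Char)
    (d : PySem.Dict Char (List Char))
    (g : Char → Char)
    (hd : ∀ c ∈ w, d.getD c [] = [g c]) :
    w.foldl (fun ret x => ret ++ d.getD x []) ([] : List Char) = w.map g := by
  rw [PySem.List.foldl_append_eq_flatMap]
  simp only [List.nil_append]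
  induction w with
  | nil => rfl
  | cons x t ih =>
    simp only [List.flatMap_cons, List.map_cons]
    rw [hd x (by simp), ih (fun c hc => hd c (by simp [hc]))]
    rfl

-- ===== VERDICT (by name: the statement is the Claim_ definition above) =====
theorem duplicate_encode_long_spec : Claim_equal_duplicate_encode_long := by
  intro word _
  unfold Spec_duplicate_encode_long duplicate_encode_long duplicate_encode_long_alt
  simp only
  generalize (PySem.Str.lower word).toList = s
  rw [PySem.List.slice_from_one]
  have hsorted : (PySem.List.sorted s (fun x => x) false).Pairwise (· ≤ ·) := by
    simpa using PySem.List.sorted_pairwise s (fun x => x)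
  have hcount : ∀ c, (PySem.List.sorted s (fun x => x) false).count c = s.count c :=
    fun c => (PySem.List.sorted_perm s _ _).count_eq c
  rw [pvA_ret_eq_map s _ (fun c => if s.count c = 1 then '(' else ')')
    (by
      intro c hc
      rw [pvDictA_getD s c]
      have h1 : 1 ≤ s.count c := List.one_le_count_iff.mpr hc
      split_ifs with h0 hone
      · omega
      · simp [hone]
      · simp [hone])]
  congr 1
  apply List.map_congr_left
  intro c hc
  have h1 : 1 ≤ s.count c := List.one_le_count_iff.mpr hc
  by_cases h2 : 2 ≤ s.count c
  · have hmem : c ∈ PySem.Set.ofList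
        (((PySem.List.sorted s (fun x => x) false).zip
          (PySem.List.sorted s (fun x => x) false).tail).filterMap
          (fun p => if p.1 = p.2 then some p.1 else none)) :=
      (PySem.Set.mem_ofList _ c).mpr ((pvAdjDups_mem _ hsorted c).mpr (by rw [hcount]; exact h2))
    rw [(PySem.Set.contains_iff _ c).mpr hmem]
    simp [show s.count c ≠ 1 by omega]
  · have hone : s.count c = 1 := by omega
    have hnmem : ¬ (PySem.Set.contains (PySem.Set.ofList
        (((PySem.List.sorted s (fun x => x) false).zip
          (PySem.List.sorted s (fun x => x) false).tail).filterMap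
          (fun p => if p.1 = p.2 then some p.1 else none))) c = true) := by
      intro hcontains
      exact h2 (by rw [← hcount]
                   exact (pvAdjDups_mem _ hsorted c).mp
                     ((PySem.Set.mem_ofList _ c).mp ((PySem.Set.contains_iff _ c).mp hcontains)))
    rw [Bool.not_eq_true] at hnmem
    rw [hnmem]
    simp [hone]
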